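-- pv_equiv track=rewrite | github.com/lordgrenville/Python-Scripts | scrape_jobs/secret_scrape.py | organise
-- ===== SOURCE A (Python) =====
-- def length_enforcer(the_list, length):
--     """
--     remove from list of tuples those which go above a given length
--     """
--     return [value for value in the_list if len(value) == length]
--
-- def organise(jobs):
--     """
--     make list of lists
--     """
--     result = []
--     new_list = []
--     for job in jobs:
--         if len(new_list) == 7:
--             a = list(new_list)
--             result.append(a)
--             new_list = [job]
--         else:
--             new_list.append(job)
--     result.append(new_list)
--     return length_enforcer(result, 7)
-- ===== SOURCE B (Python) =====
-- def organise(jobs):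
--     """
--     make list of lists
--     """
--     n = len(jobs) // 7
--     return [list(jobs[i * 7 : i * 7 + 7]) for i in range(n)]
-- ===== Notes on version B (the rewrite author's own statement) =====
-- stated objective: simpler
-- what changed: Replaces A's running-buffer loop (append, flush at 7, then length_enforcer post-filter) with direct index slicing of the len(jobs)//7 complete chunks.
import Mathlib
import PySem

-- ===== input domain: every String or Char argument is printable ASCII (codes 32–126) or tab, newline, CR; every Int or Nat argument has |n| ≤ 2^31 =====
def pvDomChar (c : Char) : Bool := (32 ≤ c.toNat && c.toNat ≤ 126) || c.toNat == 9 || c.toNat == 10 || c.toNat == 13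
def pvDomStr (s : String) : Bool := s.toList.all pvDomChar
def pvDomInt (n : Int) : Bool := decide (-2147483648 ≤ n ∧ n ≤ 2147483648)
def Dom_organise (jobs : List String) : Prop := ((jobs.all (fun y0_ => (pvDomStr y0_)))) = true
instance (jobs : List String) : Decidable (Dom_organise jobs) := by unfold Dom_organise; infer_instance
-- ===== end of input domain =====

-- B replaces A's running-buffer accumulation + post-filter with direct slicing of the complete chunks (objective: simpler).

-- ===== PORT A =====
def lengthEnforcer (theList : List (List String)) (length : Int) : List (List String) :=
  theList.filter (fun value => ((value.length : Int) == length))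

def organise (jobs : List String) : List (List String) :=
  let st := jobs.foldl
    (fun (p : List (List String) × List String) job =>
      if p.2.length = 7 then (p.1 ++ [p.2], [job]) else (p.1, p.2 ++ [job]))
    ([], [])
  lengthEnforcer (st.1 ++ [st.2]) 7

-- ===== PORT B =====
def organise_alt (jobs : List String) : List (List String) :=
  (List.range (jobs.length / 7)).map
    (fun (i : Nat) => PySem.List.slice jobs (some ((i : Int) * 7)) (some ((i : Int) * 7 + 7)))

-- ===== PRECONDITION & SPEC =====
def Spec_organise (jobs : List String) (out : List (List String)) : Prop := out = organise_alt jobs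
instance (jobs : List String) (out : List (List String)) : Decidable (Spec_organise jobs out) := by unfold Spec_organise; infer_instance

-- ===== CLAIM (what is proved, stated in full; the proofs are below) =====
def Claim_equal_organise : Prop := ∀ (jobs : List String), Dom_organise jobs → Spec_organise jobs (organise jobs)

-- ===== LEMMAS AND PROOFS =====

-- common specification: the list of complete 7-chunks, head first
def chunks7 (xs : List String) : List (List String) :=
  if _h : 7 ≤ xs.length then xs.take 7 :: chunks7 (xs.drop 7) else []
termination_by xs.length
decreasing_by simp; omega

def stepA (p : List (List String) × List String) (job : String) : List (List String) × List String :=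
  if p.2.length = 7 then (p.1 ++ [p.2], [job]) else (p.1, p.2 ++ [job])

def pA (v : List String) : Bool := ((v.length : Int) == 7)

lemma pA_iff (v : List String) : pA v = true ↔ v.length = 7 := by
  simp [pA]; omega

lemma loopA_key : ∀ (jobs : List String) (acc : List (List String)) (buf : List String),
    buf.length ≤ 7 →
    ((jobs.foldl stepA (acc, buf)).1 ++ [(jobs.foldl stepA (acc, buf)).2]).filter pA
      = acc.filter pA ++ chunks7 (buf ++ jobs) := by
  intro jobs
  induction jobs with
  | nil =>
    intro acc buf hb
    simp only [List.foldl_nil, List.filter_append, List.append_nil]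
    congr 1
    by_cases h7 : buf.length = 7
    · rw [chunks7, dif_pos (by omega)]
      rw [List.take_of_length_le (by omega), List.drop_of_length_le (by omega)]
      rw [chunks7, dif_neg (by simp)]
      simp [List.filter, (pA_iff buf).2 h7]
    · rw [chunks7, dif_neg (by omega)]
      have hfb : pA buf = false := by
        cases hp : pA buf
        · rfl
        · exact absurd ((pA_iff buf).1 hp) h7
      simp [List.filter, hfb]
  | cons j js ih =>
    intro acc buf hb
    by_cases h7 : buf.length = 7
    · have hstep : stepA (acc, buf) j = (acc ++ [buf], [j]) := by simp [stepA, h7]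
      rw [List.foldl_cons, hstep, ih (acc ++ [buf]) [j] (by simp)]
      have hc : chunks7 (buf ++ j :: js) = buf :: chunks7 (j :: js) := by
        rw [chunks7]
        have hlen : 7 ≤ (buf ++ j :: js).length := by simp [h7]
        rw [dif_pos hlen]
        have ht : (buf ++ j :: js).take 7 = buf := by
          rw [← h7, List.take_left]
        have hd : (buf ++ j :: js).drop 7 = j :: js := by
          rw [← h7, List.drop_left]
        rw [ht, hd]
      rw [hc]
      simp [List.filter_append, List.filter, (pA_iff buf).2 h7]
    · have hstep : stepA (acc, buf) j = (acc, buf ++ [j]) := by simp [stepA, h7]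
      rw [List.foldl_cons, hstep, ih acc (buf ++ [j]) (by simp; omega)]
      simp

lemma organise_eq_chunks7 (jobs : List String) : organise jobs = chunks7 jobs := by
  have h := loopA_key jobs [] [] (by simp)
  simpa [organise, lengthEnforcer, stepA, pA] using h

lemma alt_eq_chunks7 (jobs : List String) : organise_alt jobs = chunks7 jobs := by
  unfold organise_alt
  generalize hn : jobs.length / 7 = n
  induction n generalizing jobs with
  | zero =>
    rw [chunks7, dif_neg (by omega)]
    simp
  | succ k ih =>
    have hlen : 7 ≤ jobs.length := by omega
    rw [chunks7, dif_pos hlen]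
    rw [List.range_succ_eq_map, List.map_cons, List.map_map]
    congr 1
    · have : ((0 : Nat) : Int) * 7 = ((0 : Nat) : Int) := by norm_num
      simpa using PySem.List.slice_natCast_add jobs 0 7
    · have hdlen : (jobs.drop 7).length / 7 = k := by
        simp only [List.length_drop]; omega
      rw [← ih (jobs.drop 7) hdlen]
      apply List.map_congr_left
      intro i _
      simp only [Function.comp]
      have h1 : ((i + 1 : Nat) : Int) * 7 = (((i * 7 + 7 : Nat)) : Int) := by push_cast; ring
      have h2 : ((i + 1 : Nat) : Int) * 7 + 7 = ((i * 7 + 7 : Nat) : Int) + ((7 : Nat) : Int) := by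
        push_cast; ring
      have h3 : ((i : Nat) : Int) * 7 = ((i * 7 : Nat) : Int) := by push_cast; ring
      have h4 : ((i : Nat) : Int) * 7 + 7 = ((i * 7 : Nat) : Int) + ((7 : Nat) : Int) := by
        push_cast; ring
      rw [h2, h1, PySem.List.slice_natCast_add, h4, h3, PySem.List.slice_natCast_add]
      rw [List.drop_drop, Nat.add_comm (i * 7) 7]

-- ===== VERDICT (by name: the statement is the Claim_ definition above) =====
theorem organise_spec : Claim_equal_organise := by
  intro jobs _
  unfold Spec_organise
  rw [organise_eq_chunks7, alt_eq_chunks7]
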